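-- pv_equiv track=rewrite | github.com/jakemiller13/School | MITx 6.00.2x - Introduction to Computational Thinking and Data Science/Unit 1/Lecture 2.1.py | yieldAllCombos_ans
-- ===== SOURCE A (Python) =====
-- def yieldAllCombos_ans(items):
--     """
--     Generates all combinations of N items into two bags, whereby each item is in one or zero bags.
--
--     Yields a tuple, (bag1, bag2), where each bag is represented as a list of which item(s) are in each bag.
--     """
--     N = len(items)
--     # Enumerate the 3**N possible combinations
--     for i in range(3**N):
--         bag1 = []
--         bag2 = []
--         for j in range(N):
--             if (i // (3 ** j)) % 3 == 1:
--                 bag1.append(items[j])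
--             elif (i // (3 ** j)) % 3 == 2:
--                 bag2.append(items[j])
--         yield (bag1, bag2)
-- ===== SOURCE B (Python) =====
-- def yieldAllCombos_ans(items):
--     """
--     Generates all combinations of N items into two bags, whereby each item is in one or zero bags.
--
--     Yields a tuple, (bag1, bag2), where each bag is represented as a list of which item(s) are in each bag.
--     """
--     combos = [([], [])]
--     for x in items:
--         combos = (combos
--                   + [(b1 + [x], b2) for (b1, b2) in combos]
--                   + [(b1, b2 + [x]) for (b1, b2) in combos])
--     yield from combos
-- ===== Notes on version B (the rewrite author's own statement) =====
-- stated objective: simpler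
-- what changed: Replaces the base-3 counter decode (an inner loop re-dividing the counter for every item at every one of the 3^N indices) with a single incremental fold that triples the combination list once per item, appending the item to neither/first/second bag.
import Mathlib
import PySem

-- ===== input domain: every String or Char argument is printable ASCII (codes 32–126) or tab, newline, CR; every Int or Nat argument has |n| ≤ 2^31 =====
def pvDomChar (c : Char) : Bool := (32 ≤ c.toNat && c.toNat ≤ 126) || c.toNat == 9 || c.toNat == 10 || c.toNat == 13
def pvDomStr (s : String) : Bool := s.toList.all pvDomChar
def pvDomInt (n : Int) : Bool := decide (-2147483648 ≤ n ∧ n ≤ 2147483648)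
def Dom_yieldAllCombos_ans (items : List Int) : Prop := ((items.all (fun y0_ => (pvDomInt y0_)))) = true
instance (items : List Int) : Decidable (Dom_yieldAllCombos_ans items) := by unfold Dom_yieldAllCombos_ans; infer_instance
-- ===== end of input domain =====

-- B replaces A's base-3 counter decoding with an incremental fold that triples the
-- combination list per item (objective: simpler, and it drops the per-index digit loop).
-- A is a Python generator; both ports return the list of yielded (bag1, bag2) pairs.


-- ===== PORT A =====
-- one step of A's inner loop over j (the digit decode for item j)
def pvStepA (items : List Int) (i : Nat) (bags : List Int × List Int) (j : Nat) : List Int × List Int :=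
  if (i / 3 ^ j) % 3 = 1 then (bags.1 ++ [items.getD j 0], bags.2)
  else if (i / 3 ^ j) % 3 = 2 then (bags.1, bags.2 ++ [items.getD j 0])
  else bags

def yieldAllCombos_ans (items : List Int) : List (List Int × List Int) :=
  let N := items.length
  (List.range (3 ^ N)).foldl (fun acc i =>
    acc ++ [(List.range N).foldl (pvStepA items i) ([], [])]) []

-- ===== PORT B =====
def yieldAllCombos_ans_alt (items : List Int) : List (List Int × List Int) :=
  items.foldl (fun combos x =>
    combos ++ combos.map (fun p => (p.1 ++ [x], p.2))
           ++ combos.map (fun p => (p.1, p.2 ++ [x]))) [([], [])]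

-- ===== PRECONDITION & SPEC =====
def Spec_yieldAllCombos_ans (items : List Int) (out : List (List Int × List Int)) : Prop := out = yieldAllCombos_ans_alt items
instance (items : List Int) (out : List (List Int × List Int)) : Decidable (Spec_yieldAllCombos_ans items out) := by unfold Spec_yieldAllCombos_ans; infer_instance

-- ===== CLAIM (what is proved, stated in full; the proofs are below) =====
def Claim_equal_yieldAllCombos_ans : Prop := ∀ (items : List Int), Dom_yieldAllCombos_ans items → Spec_yieldAllCombos_ans items (yieldAllCombos_ans items)

-- ===== LEMMAS AND PROOFS =====

-- A's inner loop as a function of the counter i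
def pvInner (items : List Int) (i : Nat) : List Int × List Int :=
  (List.range items.length).foldl (pvStepA items i) ([], [])

lemma yieldAllCombos_ans_eq_map (items : List Int) :
    yieldAllCombos_ans items = (List.range (3 ^ items.length)).map (pvInner items) := by
  simpa [yieldAllCombos_ans, pvInner] using
    PySem.List.foldl_append_singleton_eq_map (l := List.range (3 ^ items.length))
      (f := pvInner items) (acc := [])

-- adding c * 3^N does not change base-3 digits below N
lemma digit_add_high (c r j N : Nat) (hj : j < N) :
    ((c * 3 ^ N + r) / 3 ^ j) % 3 = (r / 3 ^ j) % 3 := by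
  have h1 : c * 3 ^ N = 3 ^ j * (c * 3 ^ (N - j)) := by
    rw [← mul_assoc, mul_comm (3 ^ j) c, mul_assoc, ← pow_add]
    congr 2
    omega
  have h2 : c * 3 ^ (N - j) = 3 * (c * 3 ^ (N - j - 1)) := by
    rw [← mul_assoc, mul_comm 3 c, mul_assoc]
    congr 1
    rw [← pow_succ']
    congr 1
    omega
  rw [h1, Nat.mul_add_div (pow_pos (by norm_num) j), h2, Nat.mul_add_mod]

-- the j < N prefix of A's inner loop ignores the appended item and the high digit
lemma stepA_concat_low (items : List Int) (x : Int) (c r : Nat)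
    (bags : List Int × List Int) (j : Nat) (hj : j < items.length) :
    pvStepA (items ++ [x]) (c * 3 ^ items.length + r) bags j = pvStepA items r bags j := by
  have hg : (items ++ [x])[j]? = items[j]? := List.getElem?_append_left (by omega)
  simp [pvStepA, digit_add_high c r j items.length hj, hg]

lemma inner_concat (items : List Int) (x : Int) (c r : Nat)
    (hr : r < 3 ^ items.length) (hc : c < 3) :
    pvInner (items ++ [x]) (c * 3 ^ items.length + r) =
      (if c = 1 then ((pvInner items r).1 ++ [x], (pvInner items r).2)
       else if c = 2 then ((pvInner items r).1, (pvInner items r).2 ++ [x])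
       else pvInner items r) := by
  have hlen : (items ++ [x]).length = items.length + 1 := by simp
  have hpref : ∀ (bags : List Int × List Int),
      (List.range items.length).foldl (pvStepA (items ++ [x]) (c * 3 ^ items.length + r)) bags =
      (List.range items.length).foldl (pvStepA items r) bags := by
    intro bags
    apply PySem.List.foldl_congr_mem
    intro bags' j hj
    exact stepA_concat_low items x c r bags' j (List.mem_range.mp hj)
  have hdigN : ((c * 3 ^ items.length + r) / 3 ^ items.length) % 3 = c := by
    have h : (c * 3 ^ items.length + r) / 3 ^ items.length = c + r / 3 ^ items.length := by
      rw [mul_comm, Nat.mul_add_div (pow_pos (by norm_num) items.length)]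
    rw [h, Nat.div_eq_of_lt hr, Nat.add_zero, Nat.mod_eq_of_lt hc]
  unfold pvInner
  rw [hlen, List.range_succ, List.foldl_append, hpref]
  simp only [List.foldl_cons, List.foldl_nil]
  unfold pvStepA
  rw [hdigN, show (items ++ [x]).getD items.length 0 = x from by
    simp [List.getD_eq_getElem?_getD]]

lemma A_concat (items : List Int) (x : Int) :
    yieldAllCombos_ans (items ++ [x]) =
      yieldAllCombos_ans items
        ++ (yieldAllCombos_ans items).map (fun p => (p.1 ++ [x], p.2))
        ++ (yieldAllCombos_ans items).map (fun p => (p.1, p.2 ++ [x])) := by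
  have h0 : (List.range (3 ^ items.length)).map (pvInner (items ++ [x])) =
      (List.range (3 ^ items.length)).map (pvInner items) := by
    apply List.map_congr_left
    intro r hr
    simpa using inner_concat items x 0 r (List.mem_range.mp hr) (by norm_num)
  have h1 : (List.range (3 ^ items.length)).map
        (fun r => pvInner (items ++ [x]) (3 ^ items.length + r)) =
      (List.range (3 ^ items.length)).map
        (fun r => ((pvInner items r).1 ++ [x], (pvInner items r).2)) := by
    apply List.map_congr_left
    intro r hr
    simpa using inner_concat items x 1 r (List.mem_range.mp hr) (by norm_num)
  have h2 : (List.range (3 ^ items.length)).map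
        (fun r => pvInner (items ++ [x]) (3 ^ items.length + (3 ^ items.length + r))) =
      (List.range (3 ^ items.length)).map
        (fun r => ((pvInner items r).1, (pvInner items r).2 ++ [x])) := by
    apply List.map_congr_left
    intro r hr
    have harg : 3 ^ items.length + (3 ^ items.length + r) = 2 * 3 ^ items.length + r := by ring
    rw [harg]
    simpa using inner_concat items x 2 r (List.mem_range.mp hr) (by norm_num)
  rw [yieldAllCombos_ans_eq_map, yieldAllCombos_ans_eq_map]
  have hlen : (items ++ [x]).length = items.length + 1 := by simp
  rw [hlen, show 3 ^ (items.length + 1) =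
      3 ^ items.length + (3 ^ items.length + 3 ^ items.length) from by ring,
    List.range_add, List.range_add]
  simp only [List.map_append, List.map_map, Function.comp_def]
  rw [h0, h1, h2, List.append_assoc]

lemma B_concat (items : List Int) (x : Int) :
    yieldAllCombos_ans_alt (items ++ [x]) =
      yieldAllCombos_ans_alt items
        ++ (yieldAllCombos_ans_alt items).map (fun p => (p.1 ++ [x], p.2))
        ++ (yieldAllCombos_ans_alt items).map (fun p => (p.1, p.2 ++ [x])) := by
  unfold yieldAllCombos_ans_alt
  rw [List.foldl_append]
  simp

lemma A_eq_B (items : List Int) : yieldAllCombos_ans items = yieldAllCombos_ans_alt items := by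
  induction items using List.reverseRecOn with
  | nil => decide
  | append_singleton ys x ih => rw [A_concat, B_concat, ih]

-- ===== VERDICT (by name: the statement is the Claim_ definition above) =====
theorem yieldAllCombos_ans_spec : Claim_equal_yieldAllCombos_ans := by
  intro items _
  unfold Spec_yieldAllCombos_ans
  exact A_eq_B items
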